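-- pv_equiv track=rewrite | github.com/dnyaneshwarimhaisne06/BankFusion | backend/services/pdf_processor.py | detect_bank_type_from_name
-- ===== SOURCE A (Python) =====
-- BANK_NAME_MAP = {
--     'State Bank of India': 'SBI',
--     'SBI': 'SBI',
--     'HDFC Bank': 'HDFC',
--     'HDFC': 'HDFC',
--     'Bank of India': 'BOI',
--     'BOI': 'BOI',
--     'Central Bank of India': 'CBI',
--     'Central Bank': 'CBI',
--     'CBI': 'CBI',
--     'CENTRAL BANK OF INDIA': 'CBI',
--     'Union Bank of India': 'UNION',
--     'Union Bank': 'UNION',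
--     'UNION': 'UNION',
--     'UNION BANK OF INDIA': 'UNION',
--     'Axis Bank': 'AXIS',
--     'AXIS': 'AXIS'
-- }
--
-- def detect_bank_type_from_name(bank_name: str, file_path: str = None) -> str:
--     """Detect bank type from bank name"""
--     if not bank_name:
--         return 'SBI'  # Default fallback
--
--     bank_name_upper = bank_name.upper()
--
--     # Sort keys by length descending to match longest pattern first
--     # This prevents "Bank of India" matching inside "Central Bank of India"
--     sorted_keys = sorted(BANK_NAME_MAP.keys(), key=len, reverse=True)
--
--     # Check bank name
--     for key in sorted_keys:
--         value = BANK_NAME_MAP[key]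
--         if key.upper() in bank_name_upper:
--             return value
--
--     # Check file path if provided
--     if file_path:
--         path_upper = str(file_path).upper()
--         for key in sorted_keys:
--             value = BANK_NAME_MAP[key]
--             if key.upper() in path_upper:
--                 return value
--
--     return 'SBI'  # Default fallback
-- ===== SOURCE B (Python) =====
-- BANK_NAME_MAP = {
--     'State Bank of India': 'SBI',
--     'SBI': 'SBI',
--     'HDFC Bank': 'HDFC',
--     'HDFC': 'HDFC',
--     'Bank of India': 'BOI',
--     'BOI': 'BOI',
--     'Central Bank of India': 'CBI',
--     'Central Bank': 'CBI',
--     'CBI': 'CBI',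
--     'CENTRAL BANK OF INDIA': 'CBI',
--     'Union Bank of India': 'UNION',
--     'Union Bank': 'UNION',
--     'UNION': 'UNION',
--     'UNION BANK OF INDIA': 'UNION',
--     'Axis Bank': 'AXIS',
--     'AXIS': 'AXIS'
-- }
--
--
-- def _best_match(text):
--     """Longest key whose uppercased form occurs in text; earliest-inserted wins ties."""
--     best_value = None
--     best_len = 0
--     for key, value in BANK_NAME_MAP.items():
--         ku = key.upper()
--         if len(ku) > best_len and ku in text:
--             best_value, best_len = value, len(ku)
--     return best_value
--
--
-- def detect_bank_type_from_name(bank_name: str, file_path: str = None) -> str: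
--     """Detect bank type from bank name"""
--     if not bank_name:
--         return 'SBI'
--     found = _best_match(bank_name.upper())
--     if found is not None:
--         return found
--     if file_path:
--         found = _best_match(str(file_path).upper())
--         if found is not None:
--             return found
--     return 'SBI'
-- ===== Notes on version B (the rewrite author's own statement) =====
-- stated objective: simpler
-- what changed: Replaces the sort-all-keys-by-length-then-scan-for-first-match strategy by a single running-maximum pass over the dict in insertion order, keeping the longest matching key seen so far (strict > reproduces the stable-sort tie-break).
import Mathlib
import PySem

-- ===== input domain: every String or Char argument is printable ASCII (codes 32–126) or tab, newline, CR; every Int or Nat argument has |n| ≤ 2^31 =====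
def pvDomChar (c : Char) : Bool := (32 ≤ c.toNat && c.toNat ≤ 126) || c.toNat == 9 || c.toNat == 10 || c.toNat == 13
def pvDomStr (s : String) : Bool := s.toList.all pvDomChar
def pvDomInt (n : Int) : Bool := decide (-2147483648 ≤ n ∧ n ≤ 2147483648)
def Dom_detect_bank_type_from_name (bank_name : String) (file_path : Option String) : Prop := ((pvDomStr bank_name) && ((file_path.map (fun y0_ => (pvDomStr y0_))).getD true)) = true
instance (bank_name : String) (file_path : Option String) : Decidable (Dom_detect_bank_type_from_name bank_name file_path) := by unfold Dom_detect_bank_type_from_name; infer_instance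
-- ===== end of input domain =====

-- B drops A's upfront length sort and instead makes one pass over the dict keeping the longest match so far (strict '>' reproduces the stable tie-break); same return value everywhere.

-- ===== PORT A =====
def BANK_NAME_MAP : PySem.Dict String String := PySem.Dict.ofList
  [("State Bank of India", "SBI"), ("SBI", "SBI"),
   ("HDFC Bank", "HDFC"), ("HDFC", "HDFC"),
   ("Bank of India", "BOI"), ("BOI", "BOI"),
   ("Central Bank of India", "CBI"), ("Central Bank", "CBI"), ("CBI", "CBI"),
   ("CENTRAL BANK OF INDIA", "CBI"),
   ("Union Bank of India", "UNION"), ("Union Bank", "UNION"), ("UNION", "UNION"),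
   ("UNION BANK OF INDIA", "UNION"),
   ("Axis Bank", "AXIS"), ("AXIS", "AXIS")]

-- A's 'for key in sorted_keys: … return value' loop: first key matching, else none
def pvLoopA (keys : List String) (s : String) : Option String :=
  match keys with
  | [] => none
  | k :: rest =>
    let value := PySem.Dict.getD BANK_NAME_MAP k ""
    if PySem.Str.isIn (PySem.Str.upper k) s then some value else pvLoopA rest s

def detect_bank_type_from_name (bank_name : String) (file_path : Option String) : String :=
  if bank_name = "" then "SBI"
  else
    let bank_name_upper := PySem.Str.upper bank_name
    let sorted_keys := PySem.List.sorted (PySem.Dict.keys BANK_NAME_MAP) (fun k => PySem.Str.len k) true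
    match pvLoopA sorted_keys bank_name_upper with
    | some v => v
    | none =>
      match file_path with
      | some fp =>
        if fp = "" then "SBI"
        else
          let path_upper := PySem.Str.upper fp
          match pvLoopA sorted_keys path_upper with
          | some v => v
          | none => "SBI"
      | none => "SBI"

-- ===== PORT B =====
-- Source B's _best_match: one fold over the items keeping (best_value, best_len)
def pvBestMatch (text : String) : Option String :=
  ((PySem.Dict.items BANK_NAME_MAP).foldl
    (fun (best : Option String × Int) kv =>
      let ku := PySem.Str.upper kv.1
      if decide (best.2 < PySem.Str.len ku) && PySem.Str.isIn ku text then (some kv.2, PySem.Str.len ku)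
      else best)
    (none, 0)).1

def detect_bank_type_from_name_alt (bank_name : String) (file_path : Option String) : String :=
  if bank_name = "" then "SBI"
  else
    match pvBestMatch (PySem.Str.upper bank_name) with
    | some v => v
    | none =>
      match file_path with
      | some fp =>
        if fp = "" then "SBI"
        else
          match pvBestMatch (PySem.Str.upper fp) with
          | some v => v
          | none => "SBI"
      | none => "SBI"

-- ===== PRECONDITION & SPEC =====
def Spec_detect_bank_type_from_name (bank_name : String) (file_path : Option String) (out : String) : Prop := out = detect_bank_type_from_name_alt bank_name file_path
instance (bank_name : String) (file_path : Option String) (out : String) : Decidable (Spec_detect_bank_type_from_name bank_name file_path out) := by unfold Spec_detect_bank_type_from_name; infer_instance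

-- ===== CLAIM (what is proved, stated in full; the proofs are below) =====
def Claim_equal_detect_bank_type_from_name : Prop := ∀ (bank_name : String) (file_path : Option String), Dom_detect_bank_type_from_name bank_name file_path → Spec_detect_bank_type_from_name bank_name file_path (detect_bank_type_from_name bank_name file_path)

-- ===== LEMMAS AND PROOFS =====

-- Generic machinery: the single fold with a strict running maximum equals
-- "first match in the stable length-descending sort".
def pvFirstHit : List (Bool × Int × String) → Option (Int × String)
  | [] => none
  | x :: t => if x.1 then some (x.2.1, x.2.2) else pvFirstHit t

def pvFirstVal : List (Bool × Int × String) → Option String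
  | [] => none
  | x :: t => if x.1 then some x.2.2 else pvFirstVal t

def pvEnc : Option (Int × String) → Option String × Int
  | none => (none, 0)
  | some mv => (some mv.2, mv.1)

def pvStep (best : Option String × Int) (x : Bool × Int × String) : Option String × Int :=
  if decide (best.2 < x.2.1) && x.1 then (some x.2.2, x.2.1) else best

def pvTr (s : String) (kv : String × String) : Bool × Int × String :=
  (PySem.Str.isIn (PySem.Str.upper kv.1) s, PySem.Str.len (PySem.Str.upper kv.1), kv.2)

theorem pvEnc_fst (l : List (Bool × Int × String)) : (pvEnc (pvFirstHit l)).1 = pvFirstVal l := by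
  induction l with
  | nil => rfl
  | cons y t ih =>
    by_cases hy : y.1
    · simp [pvFirstHit, pvFirstVal, pvEnc, hy]
    · simp only [pvFirstHit, pvFirstVal, hy, Bool.false_eq_true, if_false]
      exact ih

theorem pvFirstHit_mem (l : List (Bool × Int × String)) (mv : Int × String)
    (h : pvFirstHit l = some mv) : ∃ z ∈ l, z.2.1 = mv.1 := by
  induction l with
  | nil => simp [pvFirstHit] at h
  | cons y t ih =>
    by_cases hy : y.1
    · rw [pvFirstHit, if_pos hy] at h
      exact ⟨y, List.mem_cons_self, by simp [← Option.some_inj.1 h]⟩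
    · rw [pvFirstHit, if_neg hy] at h
      obtain ⟨z, hz, hz2⟩ := ih h
      exact ⟨z, List.mem_cons_of_mem _ hz, hz2⟩

theorem pvFirstHit_insertBy (x : Bool × Int × String) (hx : 0 < x.2.1) :
    ∀ (l : List (Bool × Int × String)), l.Pairwise (fun a b => b.2.1 ≤ a.2.1) →
      pvEnc (pvFirstHit (PySem.List.insertBy (fun a b => decide (b.2.1 < a.2.1)) x l))
        = pvStep (pvEnc (pvFirstHit l)) x := by
  intro l
  induction l with
  | nil =>
    intro _
    by_cases hxb : x.1 <;> simp [PySem.List.insertBy, pvFirstHit, pvEnc, pvStep, hxb, hx]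
  | cons y t ih =>
    intro hpw
    rw [List.pairwise_cons] at hpw
    by_cases hcmp : y.2.1 < x.2.1
    · rw [show PySem.List.insertBy (fun a b => decide (b.2.1 < a.2.1)) x (y :: t) = x :: y :: t by
        simp [PySem.List.insertBy, hcmp]]
      by_cases hxb : x.1
      · rcases hfh : pvFirstHit (y :: t) with _ | mv
        · simp [pvFirstHit, pvEnc, pvStep, hxb, hx]
        · obtain ⟨z, hz, hz2⟩ := pvFirstHit_mem _ _ hfh
          have hzle : z.2.1 ≤ y.2.1 := by
            rcases List.mem_cons.1 hz with rfl | hz'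
            · exact le_refl _
            · exact hpw.1 z hz'
          have : mv.1 < x.2.1 := by omega
          simp [pvFirstHit, pvEnc, pvStep, hxb, this]
      · simp [pvFirstHit, pvEnc, pvStep, hxb]
    · rw [show PySem.List.insertBy (fun a b => decide (b.2.1 < a.2.1)) x (y :: t)
          = y :: PySem.List.insertBy (fun a b => decide (b.2.1 < a.2.1)) x t by
        simp [PySem.List.insertBy, hcmp]]
      by_cases hyb : y.1
      · have hcond : ¬ (y.2.1 < x.2.1) := hcmp
        simp [pvFirstHit, pvEnc, pvStep, hyb, hcond]
      · simp only [pvFirstHit, hyb, if_neg, Bool.false_eq_true, not_false_eq_true]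
        exact ih hpw.2

theorem pvFold_sorted (lb : List (Bool × Int × String)) (h : ∀ y ∈ lb, 0 < y.2.1) :
    lb.foldl pvStep (none, 0)
      = pvEnc (pvFirstHit (PySem.List.sorted lb (fun x => x.2.1) true)) := by
  induction lb using List.reverseRecOn with
  | nil => rfl
  | append_singleton t x ih =>
    rw [PySem.List.sorted_rev_eq_foldl_insertBy, List.foldl_append, List.foldl_append,
        List.foldl_cons, List.foldl_nil, List.foldl_cons, List.foldl_nil,
        ih (fun y hy => h y (List.mem_append_left _ hy)),
        ← PySem.List.sorted_rev_eq_foldl_insertBy]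
    exact (pvFirstHit_insertBy x (h x (List.mem_append_right _ List.mem_cons_self)) _
      (PySem.List.sorted_pairwise_rev _ _)).symm

theorem pvPhase_eq (s : String) :
    pvLoopA (PySem.List.sorted (PySem.Dict.keys BANK_NAME_MAP) (fun k => PySem.Str.len k) true) s
      = pvBestMatch s := by
  have hsk : PySem.List.sorted (PySem.Dict.keys BANK_NAME_MAP) (fun k => PySem.Str.len k) true = ["Central Bank of India", "CENTRAL BANK OF INDIA", "State Bank of India", "Union Bank of India", "UNION BANK OF INDIA", "Bank of India", "Central Bank", "Union Bank", "HDFC Bank", "Axis Bank", "UNION", "HDFC", "AXIS", "SBI", "BOI", "CBI"] := by decide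
  have hu0 : PySem.Str.upper "AXIS" = "AXIS" := by decide
  have hu1 : PySem.Str.upper "Axis Bank" = "AXIS BANK" := by decide
  have hu2 : PySem.Str.upper "BOI" = "BOI" := by decide
  have hu3 : PySem.Str.upper "Bank of India" = "BANK OF INDIA" := by decide
  have hu4 : PySem.Str.upper "CBI" = "CBI" := by decide
  have hu5 : PySem.Str.upper "CENTRAL BANK OF INDIA" = "CENTRAL BANK OF INDIA" := by decide
  have hu6 : PySem.Str.upper "Central Bank" = "CENTRAL BANK" := by decide
  have hu7 : PySem.Str.upper "Central Bank of India" = "CENTRAL BANK OF INDIA" := by decide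
  have hu8 : PySem.Str.upper "HDFC" = "HDFC" := by decide
  have hu9 : PySem.Str.upper "HDFC Bank" = "HDFC BANK" := by decide
  have hu10 : PySem.Str.upper "SBI" = "SBI" := by decide
  have hu11 : PySem.Str.upper "State Bank of India" = "STATE BANK OF INDIA" := by decide
  have hu12 : PySem.Str.upper "UNION" = "UNION" := by decide
  have hu13 : PySem.Str.upper "UNION BANK OF INDIA" = "UNION BANK OF INDIA" := by decide
  have hu14 : PySem.Str.upper "Union Bank" = "UNION BANK" := by decide
  have hu15 : PySem.Str.upper "Union Bank of India" = "UNION BANK OF INDIA" := by decide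
  have hg0 : PySem.Dict.getD BANK_NAME_MAP "AXIS" "" = "AXIS" := by decide
  have hg1 : PySem.Dict.getD BANK_NAME_MAP "Axis Bank" "" = "AXIS" := by decide
  have hg2 : PySem.Dict.getD BANK_NAME_MAP "BOI" "" = "BOI" := by decide
  have hg3 : PySem.Dict.getD BANK_NAME_MAP "Bank of India" "" = "BOI" := by decide
  have hg4 : PySem.Dict.getD BANK_NAME_MAP "CBI" "" = "CBI" := by decide
  have hg5 : PySem.Dict.getD BANK_NAME_MAP "CENTRAL BANK OF INDIA" "" = "CBI" := by decide
  have hg6 : PySem.Dict.getD BANK_NAME_MAP "Central Bank" "" = "CBI" := by decide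
  have hg7 : PySem.Dict.getD BANK_NAME_MAP "Central Bank of India" "" = "CBI" := by decide
  have hg8 : PySem.Dict.getD BANK_NAME_MAP "HDFC" "" = "HDFC" := by decide
  have hg9 : PySem.Dict.getD BANK_NAME_MAP "HDFC Bank" "" = "HDFC" := by decide
  have hg10 : PySem.Dict.getD BANK_NAME_MAP "SBI" "" = "SBI" := by decide
  have hg11 : PySem.Dict.getD BANK_NAME_MAP "State Bank of India" "" = "SBI" := by decide
  have hg12 : PySem.Dict.getD BANK_NAME_MAP "UNION" "" = "UNION" := by decide
  have hg13 : PySem.Dict.getD BANK_NAME_MAP "UNION BANK OF INDIA" "" = "UNION" := by decide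
  have hg14 : PySem.Dict.getD BANK_NAME_MAP "Union Bank" "" = "UNION" := by decide
  have hg15 : PySem.Dict.getD BANK_NAME_MAP "Union Bank of India" "" = "UNION" := by decide
  have hit : PySem.Dict.items BANK_NAME_MAP = [("State Bank of India", "SBI"), ("SBI", "SBI"), ("HDFC Bank", "HDFC"), ("HDFC", "HDFC"), ("Bank of India", "BOI"), ("BOI", "BOI"), ("Central Bank of India", "CBI"), ("Central Bank", "CBI"), ("CBI", "CBI"), ("CENTRAL BANK OF INDIA", "CBI"), ("Union Bank of India", "UNION"), ("Union Bank", "UNION"), ("UNION", "UNION"), ("UNION BANK OF INDIA", "UNION"), ("Axis Bank", "AXIS"), ("AXIS", "AXIS")] := by decide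
  have hl0 : PySem.Str.len "AXIS" = 4 := by decide
  have hl1 : PySem.Str.len "AXIS BANK" = 9 := by decide
  have hl2 : PySem.Str.len "BOI" = 3 := by decide
  have hl3 : PySem.Str.len "BANK OF INDIA" = 13 := by decide
  have hl4 : PySem.Str.len "CBI" = 3 := by decide
  have hl5 : PySem.Str.len "CENTRAL BANK OF INDIA" = 21 := by decide
  have hl6 : PySem.Str.len "CENTRAL BANK" = 12 := by decide
  have hl8 : PySem.Str.len "HDFC" = 4 := by decide
  have hl9 : PySem.Str.len "HDFC BANK" = 9 := by decide
  have hl10 : PySem.Str.len "SBI" = 3 := by decide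
  have hl11 : PySem.Str.len "STATE BANK OF INDIA" = 19 := by decide
  have hl12 : PySem.Str.len "UNION" = 5 := by decide
  have hl13 : PySem.Str.len "UNION BANK OF INDIA" = 19 := by decide
  have hl14 : PySem.Str.len "UNION BANK" = 10 := by decide
  have hb : pvBestMatch s = (((PySem.Dict.items BANK_NAME_MAP).map (pvTr s)).foldl pvStep (none, 0)).1 := by
    rw [pvBestMatch, List.foldl_map]
    rfl
  have hpos : ∀ y ∈ (PySem.Dict.items BANK_NAME_MAP).map (pvTr s), 0 < y.2.1 := by
    intro y hy
    rcases List.mem_map.1 hy with ⟨kv, hkv, rfl⟩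
    rw [hit] at hkv
    simp only [List.mem_cons, List.not_mem_nil, or_false] at hkv
    rcases hkv with rfl | rfl | rfl | rfl | rfl | rfl | rfl | rfl | rfl | rfl | rfl | rfl | rfl | rfl | rfl | rfl <;> (simp only [pvTr]; decide)
  have hmap : (PySem.Dict.items BANK_NAME_MAP).map (pvTr s) = [(PySem.Str.isIn "STATE BANK OF INDIA" s, (19 : Int), "SBI"), (PySem.Str.isIn "SBI" s, (3 : Int), "SBI"), (PySem.Str.isIn "HDFC BANK" s, (9 : Int), "HDFC"), (PySem.Str.isIn "HDFC" s, (4 : Int), "HDFC"), (PySem.Str.isIn "BANK OF INDIA" s, (13 : Int), "BOI"), (PySem.Str.isIn "BOI" s, (3 : Int), "BOI"), (PySem.Str.isIn "CENTRAL BANK OF INDIA" s, (21 : Int), "CBI"), (PySem.Str.isIn "CENTRAL BANK" s, (12 : Int), "CBI"), (PySem.Str.isIn "CBI" s, (3 : Int), "CBI"), (PySem.Str.isIn "CENTRAL BANK OF INDIA" s, (21 : Int), "CBI"), (PySem.Str.isIn "UNION BANK OF INDIA" s, (19 : Int), "UNION"), (PySem.Str.isIn "UNION BANK" s, (10 : Int),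 "UNION"), (PySem.Str.isIn "UNION" s, (5 : Int), "UNION"), (PySem.Str.isIn "UNION BANK OF INDIA" s, (19 : Int), "UNION"), (PySem.Str.isIn "AXIS BANK" s, (9 : Int), "AXIS"), (PySem.Str.isIn "AXIS" s, (4 : Int), "AXIS")] := by
    rw [hit]
    simp only [List.map_cons, List.map_nil, pvTr, hu0, hu1, hu2, hu3, hu4, hu5, hu6, hu7, hu8, hu9, hu10, hu11, hu12, hu13, hu14, hu15, hl0, hl1, hl2, hl3, hl4, hl5, hl6, hl8, hl9, hl10, hl11, hl12, hl13, hl14]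
  have hsort : PySem.List.sorted [(PySem.Str.isIn "STATE BANK OF INDIA" s, (19 : Int), "SBI"), (PySem.Str.isIn "SBI" s, (3 : Int), "SBI"), (PySem.Str.isIn "HDFC BANK" s, (9 : Int), "HDFC"), (PySem.Str.isIn "HDFC" s, (4 : Int), "HDFC"), (PySem.Str.isIn "BANK OF INDIA" s, (13 : Int), "BOI"), (PySem.Str.isIn "BOI" s, (3 : Int), "BOI"), (PySem.Str.isIn "CENTRAL BANK OF INDIA" s, (21 : Int), "CBI"), (PySem.Str.isIn "CENTRAL BANK" s, (12 : Int), "CBI"), (PySem.Str.isIn "CBI" s, (3 : Int), "CBI"), (PySem.Str.isIn "CENTRAL BANK OF INDIA" s, (21 : Int), "CBI"), (PySem.Str.isIn "UNION BANK OF INDIA" s, (19 : Int), "UNION"), (PySem.Str.isIn "UNION BANK" s, (10 : Int), "UNION"), (PySem.Str.isIn "UNION" s, (5 : Int), "UNION"), (PySem.Str.isIn "UNION BANK OF INDIA" s, (19 : Int), "UNION"), (PySem.Str.isIn "AXIS BANK" s, (9 : Int), "AXIS"), (PySem.Str.isIn "AXIS" s, (4 : Int), "AXIS")] (fun x => x.2.1)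 true = [(PySem.Str.isIn "CENTRAL BANK OF INDIA" s, (21 : Int), "CBI"), (PySem.Str.isIn "CENTRAL BANK OF INDIA" s, (21 : Int), "CBI"), (PySem.Str.isIn "STATE BANK OF INDIA" s, (19 : Int), "SBI"), (PySem.Str.isIn "UNION BANK OF INDIA" s, (19 : Int), "UNION"), (PySem.Str.isIn "UNION BANK OF INDIA" s, (19 : Int), "UNION"), (PySem.Str.isIn "BANK OF INDIA" s, (13 : Int), "BOI"), (PySem.Str.isIn "CENTRAL BANK" s, (12 : Int), "CBI"), (PySem.Str.isIn "UNION BANK" s, (10 : Int), "UNION"), (PySem.Str.isIn "HDFC BANK" s, (9 : Int), "HDFC"), (PySem.Str.isIn "AXIS BANK" s, (9 : Int), "AXIS"), (PySem.Str.isIn "UNION" s, (5 : Int), "UNION"), (PySem.Str.isIn "HDFC" s, (4 : Int), "HDFC"), (PySem.Str.isIn "AXIS" s, (4 : Int), "AXIS"), (PySem.Str.isIn "SBI" s, (3 : Int), "SBI"), (PySem.Str.isIn "BOI" s, (3 : Int), "BOI"), (PySem.Str.isIn "CBI" s, (3 : Int), "CBI")] := by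
    rw [PySem.List.sorted_rev_eq_foldl_insertBy]
    simp [PySem.List.insertBy]
  rw [hb, pvFold_sorted _ hpos, hmap, hsort, pvEnc_fst, hsk]
  simp only [pvLoopA, pvFirstVal, hu0, hu1, hu2, hu3, hu4, hu5, hu6, hu7, hu8, hu9, hu10, hu11, hu12, hu13, hu14, hu15, hg0, hg1, hg2, hg3, hg4, hg5, hg6, hg7, hg8, hg9, hg10, hg11, hg12, hg13, hg14, hg15]

-- ===== VERDICT (by name: the statement is the Claim_ definition above) =====
theorem detect_bank_type_from_name_spec : Claim_equal_detect_bank_type_from_name := by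
  intro bank_name file_path _
  unfold Spec_detect_bank_type_from_name detect_bank_type_from_name detect_bank_type_from_name_alt
  simp only [pvPhase_eq]
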